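-- pv_equiv track=rewrite | github.com/katie-truong/leetcode | roll-dices.py | rollDices
-- ===== SOURCE A (Python) =====
-- def rollDices(arr):
--     d = {}
--     uniq = set(arr)
--     uniq_len = len(uniq)
--     pairs = 0
--     for num1 in uniq:
--         for num2 in uniq:
--             if num1 != num2 and num1 + num2 == 7:
--                 pairs += 1
--     if pairs == 0:
--         return uniq_len - 1
--     if len(uniq) > 0:
--         return len(arr) - 1
--     elif len(uniq) == 0:
--         return len(arr)
-- ===== SOURCE B (Python) =====
-- def rollDices(arr):
--     vals = sorted(set(arr))
--     i, j = 0, len(vals) - 1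
--     while i < j:
--         s = vals[i] + vals[j]
--         if s == 7:
--             return len(arr) - 1
--         if s < 7:
--             i += 1
--         else:
--             j -= 1
--     return len(vals) - 1
-- ===== Notes on version B (the rewrite author's own statement) =====
-- stated objective: faster
-- what changed: Replaces A's O(u^2) nested scan over the distinct values with sort-then-two-pointers on the sorted distinct values: one inward sweep finds a pair summing to 7 (x != 7-x always, 7 is odd), dropping A's unused dict and pair counter.
import Mathlib
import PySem

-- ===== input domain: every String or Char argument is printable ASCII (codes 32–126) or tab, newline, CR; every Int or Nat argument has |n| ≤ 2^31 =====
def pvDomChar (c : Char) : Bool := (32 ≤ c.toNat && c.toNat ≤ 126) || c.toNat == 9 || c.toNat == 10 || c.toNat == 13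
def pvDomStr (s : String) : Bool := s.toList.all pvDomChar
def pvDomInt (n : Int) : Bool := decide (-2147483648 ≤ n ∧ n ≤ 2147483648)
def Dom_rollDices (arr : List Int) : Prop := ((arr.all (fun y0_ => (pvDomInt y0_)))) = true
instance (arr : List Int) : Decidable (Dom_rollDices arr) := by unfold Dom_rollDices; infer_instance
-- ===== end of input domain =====

-- B replaces A's O(u^2) nested scan over the distinct values with sort-then-two-pointers
-- on the sorted distinct values (objective: faster).

-- ===== PORT A =====
def rollDices (arr : List Int) : Int :=
  -- d = {} is created and never used; omitted as it cannot affect the result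
  let uniq : PySem.Set Int := PySem.Set.ofList arr
  let uniqLen : Int := PySem.Set.len uniq
  let pairs : Int :=
    uniq.foldl (fun acc n1 =>
      uniq.foldl (fun acc2 n2 =>
        if n1 ≠ n2 ∧ n1 + n2 = 7 then acc2 + 1 else acc2) acc) 0
  if pairs = 0 then uniqLen - 1
  else if PySem.Set.len uniq > 0 then (arr.length : Int) - 1
  else (arr.length : Int)

-- ===== PORT B =====
-- the while loop of Source B; indices i, j are always in range when read (i < j ≤ len-1),
-- so getD's default is never returned
def pvLoopB (vals : List Int) (arrLen : Int) (i j : Nat) : Int :=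
  if i < j then
    let s := vals.getD i 0 + vals.getD j 0
    if s = 7 then arrLen - 1
    else if s < 7 then pvLoopB vals arrLen (i + 1) j
    else pvLoopB vals arrLen i (j - 1)
  else (vals.length : Int) - 1
termination_by j - i
decreasing_by all_goals omega

def rollDices_alt (arr : List Int) : Int :=
  let vals : List Int := PySem.List.sorted (PySem.Set.ofList arr) (fun x => x) false
  pvLoopB vals (arr.length : Int) 0 (vals.length - 1)

-- ===== PRECONDITION & SPEC =====
def Spec_rollDices (arr : List Int) (out : Int) : Prop := out = rollDices_alt arr
instance (arr : List Int) (out : Int) : Decidable (Spec_rollDices arr out) := by unfold Spec_rollDices; infer_instance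

-- ===== CLAIM =====
def Claim_equal_rollDices : Prop := ∀ (arr : List Int), Dom_rollDices arr → Spec_rollDices arr (rollDices arr)

-- ===== LEMMAS AND PROOFS =====

-- A's inner loop counts the n2's pairing with a fixed n1.
theorem pv_inner_count (l : List Int) (n1 acc : Int) :
    l.foldl (fun acc2 n2 => if n1 ≠ n2 ∧ n1 + n2 = 7 then acc2 + 1 else acc2) acc
      = acc + (l.countP (fun n2 => decide (n1 ≠ n2 ∧ n1 + n2 = 7)) : Int) := by
  simpa using PySem.List.foldl_count_if (fun n2 => decide (n1 ≠ n2 ∧ n1 + n2 = 7)) l acc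

-- A's double loop sums those counts.
theorem pv_outer_sum (l inner : List Int) (acc : Int) :
    l.foldl (fun a n1 =>
        inner.foldl (fun acc2 n2 => if n1 ≠ n2 ∧ n1 + n2 = 7 then acc2 + 1 else acc2) a) acc
      = acc + ((l.map (fun n1 =>
          inner.countP (fun n2 => decide (n1 ≠ n2 ∧ n1 + n2 = 7)))).sum : Int) := by
  induction l generalizing acc with
  | nil => simp
  | cons x xs ih =>
    rw [List.foldl_cons, ih, pv_inner_count, List.map_cons, List.sum_cons]
    push_cast; ring

-- A's pair counter is zero exactly when no element has its complement 7-x in the list.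
theorem pv_zero_iff (l : List Int) :
    (l.foldl (fun a n1 =>
        l.foldl (fun acc2 n2 => if n1 ≠ n2 ∧ n1 + n2 = 7 then acc2 + 1 else acc2) a) (0 : Int) = 0)
      ↔ ¬ ∃ x ∈ l, (7 - x) ∈ l := by
  rw [pv_outer_sum l l 0]
  simp only [zero_add, Nat.cast_eq_zero, List.sum_eq_zero_iff_forall_eq_nat, List.mem_map,
    forall_exists_index, and_imp, forall_apply_eq_imp_iff₂, List.countP_eq_zero,
    decide_eq_true_eq, not_and, not_exists]
  constructor
  · intro h x hx h7
    exact h x hx (7 - x) h7 (by omega) (by ring)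
  · intro h n1 h1 n2 h2 hne hsum
    exact h n1 h1 (by rw [show 7 - n1 = n2 by omega]; exact h2)

-- Two-pointer completeness: a pair summing to 7 inside the window is found.
theorem pvLoopB_found (vals : List Int) (L : Int)
    (mono : ∀ p q : Nat, p ≤ q → q < vals.length → vals.getD p 0 ≤ vals.getD q 0) :
    ∀ n i j : Nat, j - i ≤ n → j < vals.length →
    (∃ a b : Nat, i ≤ a ∧ a < b ∧ b ≤ j ∧ vals.getD a 0 + vals.getD b 0 = 7) →
    pvLoopB vals L i j = L - 1 := by
  intro n
  induction n with
  | zero =>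
    intro i j hn _ ⟨a, b, ha, hab, hb, _⟩; omega
  | succ n ih =>
    intro i j hn hj ⟨a, b, ha, hab, hb, hsum⟩
    have hij : i < j := by omega
    rw [pvLoopB, if_pos hij]
    by_cases h7 : vals.getD i 0 + vals.getD j 0 = 7
    · rw [if_pos h7]
    · rw [if_neg h7]
      by_cases hlt : vals.getD i 0 + vals.getD j 0 < 7
      · rw [if_pos hlt]
        have hai : i < a := by
          rcases Nat.lt_or_ge i a with h | h
          · exact h
          · exfalso
            have hia : a = i := by omega
            rw [hia] at hsum
            have : vals.getD b 0 ≤ vals.getD j 0 := mono b j hb hj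
            omega
        exact ih (i + 1) j (by omega) hj ⟨a, b, by omega, hab, hb, hsum⟩
      · rw [if_neg hlt]
        have hbj : b < j := by
          rcases Nat.lt_or_ge b j with h | h
          · exact h
          · exfalso
            have hbe : b = j := by omega
            rw [hbe] at hsum
            have : vals.getD i 0 ≤ vals.getD a 0 := mono i a ha (by omega)
            omega
        exact ih i (j - 1) (by omega) (by omega) ⟨a, b, ha, hab, by omega, hsum⟩

-- Two-pointer soundness: with no pair summing to 7 in the window, the sweep falls through.
theorem pvLoopB_notfound (vals : List Int) (L : Int) :
    ∀ n i j : Nat, j - i ≤ n →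
    (∀ a b : Nat, i ≤ a → a < b → b ≤ j → vals.getD a 0 + vals.getD b 0 ≠ 7) →
    pvLoopB vals L i j = (vals.length : Int) - 1 := by
  intro n
  induction n with
  | zero =>
    intro i j hn _
    rw [pvLoopB, if_neg (by omega)]
  | succ n ih =>
    intro i j hn hno
    by_cases hij : i < j
    · rw [pvLoopB, if_pos hij]
      have h7 : vals.getD i 0 + vals.getD j 0 ≠ 7 := hno i j (le_refl i) hij (le_refl j)
      rw [if_neg h7]
      by_cases hlt : vals.getD i 0 + vals.getD j 0 < 7
      · rw [if_pos hlt]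
        exact ih (i + 1) j (by omega) (fun a b ha hab hb => hno a b (by omega) hab hb)
      · rw [if_neg hlt]
        exact ih i (j - 1) (by omega) (fun a b ha hab hb => hno a b ha hab (by omega))
    · rw [pvLoopB, if_neg hij]

-- sorted(set(arr)) is monotone under getD on in-range indices
theorem pv_sorted_mono (arr : List Int) :
    ∀ p q : Nat, p ≤ q →
      q < (PySem.List.sorted (PySem.Set.ofList arr) (fun x => x) false).length →
      (PySem.List.sorted (PySem.Set.ofList arr) (fun x => x) false).getD p 0
        ≤ (PySem.List.sorted (PySem.Set.ofList arr) (fun x => x) false).getD q 0 := by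
  intro p q hpq hq
  rw [List.getD_eq_getElem _ _ (by omega), List.getD_eq_getElem _ _ hq]
  exact PySem.List.key_sorted_getElem_mono (PySem.Set.ofList arr) (fun x => x) hpq hq

-- membership bridge: x ∈ sorted(set(arr)) ↔ x ∈ set(arr)
theorem pv_mem_vals (arr : List Int) (x : Int) :
    x ∈ PySem.List.sorted (PySem.Set.ofList arr) (fun x => x) false
      ↔ x ∈ PySem.Set.ofList arr := PySem.List.mem_sorted _ _ _ _

-- the pair condition, transported to indices of sorted(set(arr))
theorem pv_cond_iff (arr : List Int) :
    (∃ x ∈ PySem.Set.ofList arr, (7 - x) ∈ PySem.Set.ofList arr)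
      ↔ (∃ a b : Nat, a < b ∧
           b < (PySem.List.sorted (PySem.Set.ofList arr) (fun x => x) false).length ∧
           (PySem.List.sorted (PySem.Set.ofList arr) (fun x => x) false).getD a 0
             + (PySem.List.sorted (PySem.Set.ofList arr) (fun x => x) false).getD b 0 = 7) := by
  set vals := PySem.List.sorted (PySem.Set.ofList arr) (fun x => x) false with hv
  constructor
  · rintro ⟨x, hx, hcx⟩
    have hx' : x ∈ vals := (pv_mem_vals arr x).mpr hx
    have hcx' : (7 - x) ∈ vals := (pv_mem_vals arr (7 - x)).mpr hcx
    obtain ⟨p, hp, hpe⟩ := List.getElem_of_mem hx'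
    obtain ⟨q, hq, hqe⟩ := List.getElem_of_mem hcx'
    have hne : p ≠ q := by
      intro h; subst h; omega
    rcases Nat.lt_or_ge p q with h | h
    · exact ⟨p, q, h, hq, by
        rw [List.getD_eq_getElem _ _ hp, List.getD_eq_getElem _ _ hq, hpe, hqe]; ring⟩
    · exact ⟨q, p, by omega, hp, by
        rw [List.getD_eq_getElem _ _ hq, List.getD_eq_getElem _ _ hp, hpe, hqe]; ring⟩
  · rintro ⟨a, b, hab, hb, hsum⟩
    have ha : a < vals.length := by omega
    refine ⟨vals.getD a 0, ?_, ?_⟩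
    · exact (pv_mem_vals arr _).mp (by
        rw [List.getD_eq_getElem _ _ ha]; exact List.getElem_mem ha)
    · have : 7 - vals.getD a 0 = vals.getD b 0 := by omega
      rw [this]
      exact (pv_mem_vals arr _).mp (by
        rw [List.getD_eq_getElem _ _ hb]; exact List.getElem_mem hb)

-- ===== VERDICT =====
theorem rollDices_spec : Claim_equal_rollDices := by
  intro arr _
  unfold Spec_rollDices rollDices rollDices_alt
  simp only []
  set l := PySem.Set.ofList arr with hl
  set vals := PySem.List.sorted l (fun x => x) false with hv
  have hlen : vals.length = l.length := PySem.List.length_sorted _ _ _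
  by_cases hc : ∃ x ∈ l, (7 - x) ∈ l
  · -- a pair exists: A takes the arr.length - 1 branch, B's sweep finds it
    have hz : ¬ (l.foldl (fun a n1 =>
        l.foldl (fun acc2 n2 => if n1 ≠ n2 ∧ n1 + n2 = 7 then acc2 + 1 else acc2) a) (0 : Int) = 0) := by
      rw [pv_zero_iff]; exact not_not_intro hc
    obtain ⟨a, b, hab, hb, hsum⟩ := (pv_cond_iff arr).mp hc
    rw [← hv] at hb hsum
    have hpos : PySem.Set.len l > 0 := by
      have h0 : 0 < l.length := by omega
      simp only [PySem.Set.len]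
      omega
    rw [if_neg hz, if_pos hpos]
    have hmono : ∀ p q : Nat, p ≤ q → q < vals.length → vals.getD p 0 ≤ vals.getD q 0 := by
      rw [hv]; exact pv_sorted_mono arr
    exact (pvLoopB_found vals (arr.length : Int) hmono
      (vals.length - 1) 0 (vals.length - 1) (le_refl _) (by omega)
      ⟨a, b, Nat.zero_le a, hab, by omega, hsum⟩).symm
  · -- no pair: A returns set-size - 1, B's sweep falls through to len(vals) - 1
    have hz : l.foldl (fun a n1 =>
        l.foldl (fun acc2 n2 => if n1 ≠ n2 ∧ n1 + n2 = 7 then acc2 + 1 else acc2) a) (0 : Int) = 0 :=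
      (pv_zero_iff l).mpr hc
    have hno : ∀ a b : Nat, 0 ≤ a → a < b → b ≤ vals.length - 1 →
        vals.getD a 0 + vals.getD b 0 ≠ 7 := by
      intro a b _ hab hb hsum
      exact hc ((pv_cond_iff arr).mpr ⟨a, b, hab,
        by rw [← hl, ← hv]; omega,
        by rw [← hl, ← hv]; exact hsum⟩)
    rw [if_pos hz]
    rw [pvLoopB_notfound vals (arr.length : Int) (vals.length - 1) 0 (vals.length - 1)
      (le_refl _) hno]
    simp [PySem.Set.len, hlen]
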